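-- pv_equiv track=rewrite | github.com/Alenlov/AoC | 2019/22/shuffle.py | sumRec
-- ===== SOURCE A (Python) =====
-- def sumRec(b,n,l):
--     if n == 0:
--         return 1
--     elif n & 1 == 1:
--         e = (b*b) % (l+1)
--         return ((1+b) * sumRec(e, n//2, l)) % (l+1)
--     else:
--         e = (b*b) % (l+1)
--         return (1 + (b + e) * sumRec(e, n//2 -1,l )) % (l+1)
-- ===== SOURCE B (Python) =====
-- def sumRec(b, n, l):
--     # 1 + b + b^2 + ... + b^n  (mod l+1), by binary decomposition of the
--     # term count: t = block sum of 2^k consecutive terms, p = b^(2^k).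
--     m = l + 1
--     res = 0   # sum of the terms already taken
--     mult = 1  # b ** (number of terms already taken)  (mod m)
--     t = 1     # 1 + b + ... + b^(2^k - 1)             (mod m)
--     p = b     # b ** (2^k)                            (mod m)
--     cnt = n + 1
--     while cnt > 0:
--         if cnt % 2 == 1:
--             res = (res + mult * t) % m
--             mult = (mult * p) % m
--         t = (t * (1 + p)) % m
--         p = (p * p) % m
--         cnt //= 2
--     return res
-- ===== Notes on version B (the rewrite author's own statement) =====
-- stated objective: alternative
-- what changed: Replaces the top-down odd/even divide-and-conquer recursion by an iterative LSB-first binary decomposition of the term count, maintaining doubling block-sum and block-power tables in four running variables.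
-- intended difference: For n=0 with l<=0 and l!=-1 A returns the literal 1 without reducing modulo l+1, while B returns 1 % (l+1) (0 for modulus 1, a non-positive value for negative moduli), the reduced value it returns on every other input, which is the consistent intended behaviour. — e.g. on sumRec(2, 0, -3): A returns 1, B returns -1
-- outside the precondition, e.g. on sumRec(5, 0, -1): A returns 1, B raises ZeroDivisionError
import Mathlib
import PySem

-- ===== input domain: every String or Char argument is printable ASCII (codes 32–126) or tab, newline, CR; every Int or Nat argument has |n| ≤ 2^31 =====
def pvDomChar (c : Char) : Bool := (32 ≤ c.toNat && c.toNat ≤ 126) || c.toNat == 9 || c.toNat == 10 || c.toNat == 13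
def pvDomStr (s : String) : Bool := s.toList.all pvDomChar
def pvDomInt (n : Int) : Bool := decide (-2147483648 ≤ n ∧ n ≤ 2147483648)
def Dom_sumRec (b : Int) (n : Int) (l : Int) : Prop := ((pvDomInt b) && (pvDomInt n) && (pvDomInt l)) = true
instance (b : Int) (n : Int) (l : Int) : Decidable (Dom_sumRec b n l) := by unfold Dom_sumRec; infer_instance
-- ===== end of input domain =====

-- B replaces A's top-down odd/even halving recursion by an iterative bit-by-bit loop with doubling block tables (alternative, similar cost).


-- ===== PORT A =====
-- fuel makes the Python recursion total; n.toNat + 1 units suffice on the admitted inputs (n ≥ 0)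
def sumRecGo (fuel : Nat) (b : Int) (n : Int) (l : Int) : Int :=
  match fuel with
  | 0 => 0
  | fuel + 1 =>
    if n = 0 then 1
    else if PySem.Int.band n 1 = 1 then
      let e := PySem.Int.mod (b * b) (l + 1)
      PySem.Int.mod ((1 + b) * sumRecGo fuel e (PySem.Int.floordiv n 2) l) (l + 1)
    else
      let e := PySem.Int.mod (b * b) (l + 1)
      PySem.Int.mod (1 + (b + e) * sumRecGo fuel e (PySem.Int.floordiv n 2 - 1) l) (l + 1)

def sumRec (b : Int) (n : Int) (l : Int) : Int := sumRecGo (n.toNat + 1) b n l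

-- ===== PORT B =====
-- fuel makes the while-loop total; (n+1).toNat + 1 units suffice (cnt halves to 0)
def sumRecLoop : Nat → Int → Int → Int → Int → Int → Int → Int
  | 0, _, _, res, _, _, _ => res
  | fuel + 1, m, cnt, res, mult, t, p =>
    if 0 < cnt then
      let res' := if PySem.Int.mod cnt 2 = 1 then PySem.Int.mod (res + mult * t) m else res
      let mult' := if PySem.Int.mod cnt 2 = 1 then PySem.Int.mod (mult * p) m else mult
      sumRecLoop fuel m (PySem.Int.floordiv cnt 2) res' mult'
        (PySem.Int.mod (t * (1 + p)) m) (PySem.Int.mod (p * p) m)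
    else res

def sumRec_alt (b : Int) (n : Int) (l : Int) : Int :=
  sumRecLoop ((n + 1).toNat + 1) (l + 1) (n + 1) 0 1 1 b

-- ===== PRECONDITION & SPEC =====
-- Pre_ excludes n < 0, where A hits RecursionError (n//2 never reaches 0), and l = -1,
-- where the modulus l+1 is 0: A raises ZeroDivisionError except in the degenerate n = 0
-- branch, where A returns 1 before ever dividing while B raises.
def Pre_sumRec (b : Int) (n : Int) (l : Int) : Prop := 0 ≤ n ∧ l ≠ -1
instance (b : Int) (n : Int) (l : Int) : Decidable (Pre_sumRec b n l) := by unfold Pre_sumRec; infer_instance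
def pvWitness_sumRec : Int × Int × Int := (3, 10, 7)

-- For n = 0 with l ≤ 0 and l ≠ -1, A returns the literal 1 without reducing modulo l+1, while B
-- returns 1 % (l+1) — the reduced value it returns on every other input — which is the consistent
-- intended behaviour.
def D_sumRec (b : Int) (n : Int) (l : Int) : Prop := n = 0 ∧ l ≤ 0 ∧ l ≠ -1
instance (b : Int) (n : Int) (l : Int) : Decidable (D_sumRec b n l) := by unfold D_sumRec; infer_instance

def Spec_sumRec (b : Int) (n : Int) (l : Int) (out : Int) : Prop := ¬ D_sumRec b n l → out = sumRec_alt b n l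
instance (b : Int) (n : Int) (l : Int) (out : Int) : Decidable (Spec_sumRec b n l out) := by unfold Spec_sumRec; infer_instance

def pvDiffWitness_sumRec : Int × Int × Int := (2, 0, -3)
def pvDiffWitnessOut_sumRec : Int × Int := (1, -1)

-- ===== CLAIM (what is proved, stated in full; the proofs are below) =====
def Claim_unchanged_sumRec : Prop := ∀ (b : Int) (n : Int) (l : Int), Dom_sumRec b n l → Pre_sumRec b n l → Spec_sumRec b n l (sumRec b n l)
def Claim_changed_sumRec : Prop := Dom_sumRec (pvDiffWitness_sumRec.1) (pvDiffWitness_sumRec.2.1) (pvDiffWitness_sumRec.2.2) ∧ Pre_sumRec (pvDiffWitness_sumRec.1) (pvDiffWitness_sumRec.2.1) (pvDiffWitness_sumRec.2.2) ∧ D_sumRec (pvDiffWitness_sumRec.1) (pvDiffWitness_sumRec.2.1) (pvDiffWitness_sumRec.2.2) ∧ sumRec (pvDiffWitness_sumRec.1) (pvDiffWitness_sumRec.2.1) (pvDiffWitness_sumRec.2.2) = pvDiffWitnessOut_sumRec.1 ∧ sumRec_alt (pvDiffWitness_sumRec.1) (pvDiffWitness_sumRec.2.1) (pvDiffWitness_sumRec.2.2)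 = pvDiffWitnessOut_sumRec.2 ∧ pvDiffWitnessOut_sumRec.1 ≠ pvDiffWitnessOut_sumRec.2
def Claim_exact_sumRec : Prop := ∀ (b : Int) (n : Int) (l : Int), Dom_sumRec b n l → Pre_sumRec b n l → D_sumRec b n l → sumRec b n l ≠ sumRec_alt b n l

-- ===== LEMMAS AND PROOFS =====

-- 1 + b + b^2 + … + b^k, in Horner form
def geomSum (b : Int) : Nat → Int
  | 0 => 1
  | k + 1 => 1 + b * geomSum b k

theorem geomSum_succ' (b : Int) (k : Nat) : geomSum b (k + 1) = geomSum b k + b ^ (k + 1) := by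
  induction k with
  | zero => simp only [geomSum]; ring
  | succ k ih =>
    calc geomSum b (k + 2) = 1 + b * geomSum b (k + 1) := rfl
      _ = 1 + b * (geomSum b k + b ^ (k + 1)) := by rw [ih]
      _ = (1 + b * geomSum b k) + b ^ (k + 2) := by ring
      _ = geomSum b (k + 1) + b ^ (k + 2) := rfl

theorem geomSum_odd (b : Int) (j : Nat) : geomSum b (2 * j + 1) = (1 + b) * geomSum (b * b) j := by
  induction j with
  | zero => simp only [geomSum]; ring
  | succ j ih =>
    have h : 2 * (j + 1) + 1 = (2 * j + 1) + 1 + 1 := by omega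
    rw [h]
    calc geomSum b ((2 * j + 1) + 1 + 1)
        = 1 + b * (1 + b * geomSum b (2 * j + 1)) := rfl
      _ = 1 + b * (1 + b * ((1 + b) * geomSum (b * b) j)) := by rw [ih]
      _ = (1 + b) * (1 + (b * b) * geomSum (b * b) j) := by ring
      _ = (1 + b) * geomSum (b * b) (j + 1) := rfl

theorem geomSum_even (b : Int) (j : Nat) :
    geomSum b (2 * j + 2) = 1 + (b + b * b) * geomSum (b * b) j := by
  have h : 2 * j + 2 = (2 * j + 1) + 1 := by omega
  rw [h]
  calc geomSum b ((2 * j + 1) + 1) = 1 + b * geomSum b (2 * j + 1) := rfl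
    _ = 1 + b * ((1 + b) * geomSum (b * b) j) := by rw [geomSum_odd]
    _ = 1 + (b + b * b) * geomSum (b * b) j := by ring

theorem geomSum_congr {a c m : Int} (h : a ≡ c [ZMOD m]) (k : Nat) :
    geomSum a k ≡ geomSum c k [ZMOD m] := by
  induction k with
  | zero => rfl
  | succ k ih => exact (Int.ModEq.add_left 1 ((h.mul ih)))

-- PySem.Int.mod a m is congruent to a modulo m
theorem pymod_modEq (a m : Int) : PySem.Int.mod a m ≡ a [ZMOD m] := by
  have h := PySem.Int.floordiv_mul_add_mod a m
  have : m ∣ a - PySem.Int.mod a m := ⟨PySem.Int.floordiv a m, by linarith [h, mul_comm (PySem.Int.floordiv a m) m]⟩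
  exact Int.modEq_iff_dvd.mpr this

-- congruent numbers have the same Python mod (any nonzero divisor)
theorem pymod_congr {a c m : Int} (hm : m ≠ 0) (h : a ≡ c [ZMOD m]) :
    PySem.Int.mod a m = PySem.Int.mod c m := by
  have ha := PySem.Int.floordiv_mul_add_mod a m
  have hc := PySem.Int.floordiv_mul_add_mod c m
  obtain ⟨k, hk⟩ := Int.ModEq.dvd h
  have hdvd : m ∣ PySem.Int.mod a m - PySem.Int.mod c m :=
    ⟨PySem.Int.floordiv c m - PySem.Int.floordiv a m - k, by linear_combination ha - hc - hk⟩
  have habs : |PySem.Int.mod a m - PySem.Int.mod c m| < |m| := by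
    rcases lt_or_gt_of_ne hm with hneg | hpos
    · obtain ⟨b1, b2⟩ := PySem.Int.mod_neg_bounds (a := a) hneg
      obtain ⟨b3, b4⟩ := PySem.Int.mod_neg_bounds (a := c) hneg
      rw [abs_of_neg hneg, abs_lt]
      omega
    · have b1 := PySem.Int.mod_nonneg a hpos
      have b2 := PySem.Int.mod_lt a hpos
      have b3 := PySem.Int.mod_nonneg c hpos
      have b4 := PySem.Int.mod_lt c hpos
      rw [abs_of_pos hpos, abs_lt]
      omega
  have hz := Int.eq_zero_of_abs_lt_dvd ((abs_dvd m _).mpr hdvd) habs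
  omega

-- characterisation of port A on 0 < n (enough fuel): the reduced geometric sum
theorem sumRecGo_char (l : Int) (hm : l + 1 ≠ 0) :
    ∀ (fuel : Nat) (n b : Int), 0 < n → n.toNat < fuel →
      sumRecGo fuel b n l = PySem.Int.mod (geomSum b n.toNat) (l + 1) := by
  intro fuel
  induction fuel with
  | zero => intro n b hn hf; omega
  | succ fuel ih =>
    intro n b hn hf
    have hn0 : ¬ n = 0 := by omega
    have hband : PySem.Int.band n 1 = PySem.Int.mod n 2 := PySem.Int.band_one n
    have hmod2 : PySem.Int.mod n 2 = n % 2 := PySem.Int.mod_eq_emod_of_pos (by omega)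
    have hdiv : PySem.Int.floordiv n 2 = n / 2 := PySem.Int.floordiv_eq_ediv_of_pos (by omega)
    have heq : (PySem.Int.mod (b * b) (l + 1)) ≡ b * b [ZMOD (l + 1)] := pymod_modEq _ _
    by_cases hodd : PySem.Int.band n 1 = 1
    · -- odd branch
      have hn2 : n % 2 = 1 := by rw [hband, hmod2] at hodd; exact hodd
      set e := PySem.Int.mod (b * b) (l + 1) with he
      set j := (n / 2).toNat with hj
      have hnt : n.toNat = 2 * j + 1 := by omega
      by_cases h1 : n = 1
      · -- n = 1: the recursive call returns 1 at n' = 0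
        subst h1
        have hfuel : ∃ f, fuel = f + 1 := by
          refine ⟨fuel - 1, ?_⟩; simp at hf; omega
        obtain ⟨f, hfv⟩ := hfuel
        simp only [sumRecGo, hn0, if_false, hodd, if_true, hdiv, hfv]
        norm_num [sumRecGo]
        congr 1
        simp [geomSum]
      · -- n ≥ 3: use the induction hypothesis
        have hn3 : 3 ≤ n := by omega
        have hrec : sumRecGo fuel e (PySem.Int.floordiv n 2) l
            = PySem.Int.mod (geomSum e j) (l + 1) := by
          rw [hdiv, hj]; exact ih (n / 2) e (by omega) (by omega)
        simp only [sumRecGo, hn0, if_false, hodd, if_true]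
        rw [hrec]
        apply pymod_congr hm
        calc (1 + b) * PySem.Int.mod (geomSum e j) (l + 1)
            ≡ (1 + b) * geomSum e j [ZMOD (l + 1)] := Int.ModEq.mul_left _ (pymod_modEq _ _)
          _ ≡ (1 + b) * geomSum (b * b) j [ZMOD (l + 1)] := Int.ModEq.mul_left _ (geomSum_congr heq j)
          _ = geomSum b (2 * j + 1) := (geomSum_odd b j).symm
          _ = geomSum b n.toNat := by rw [hnt]
    · -- even branch
      have hn2 : n % 2 = 0 := by
        rw [hband, hmod2] at hodd; omega
      set e := PySem.Int.mod (b * b) (l + 1) with he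
      set j := (n / 2 - 1).toNat with hj
      have hn4 : 2 ≤ n := by omega
      have hnt : n.toNat = 2 * j + 2 := by omega
      by_cases h2 : n = 2
      · subst h2
        have hfuel : ∃ f, fuel = f + 1 := by
          refine ⟨fuel - 1, ?_⟩; simp at hf; omega
        obtain ⟨f, hfv⟩ := hfuel
        simp only [sumRecGo, hn0, if_false, hodd, if_false, hdiv, hfv]
        norm_num [sumRecGo]
        apply pymod_congr hm
        calc 1 + (b + PySem.Int.mod (b * b) (l + 1))
            ≡ 1 + (b + b * b) [ZMOD (l + 1)] :=
              Int.ModEq.add_left 1 (Int.ModEq.add_left b (pymod_modEq _ _))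
          _ = geomSum b 2 := by simp only [geomSum]; ring
          _ = geomSum b (2 : Int).toNat := rfl
      · have hn5 : 4 ≤ n := by omega
        have hrec : sumRecGo fuel e (PySem.Int.floordiv n 2 - 1) l
            = PySem.Int.mod (geomSum e j) (l + 1) := by
          rw [hdiv, hj]; exact ih (n / 2 - 1) e (by omega) (by omega)
        simp only [sumRecGo, hn0, if_false, hodd, if_false]
        rw [hrec]
        apply pymod_congr hm
        calc 1 + (b + e) * PySem.Int.mod (geomSum e j) (l + 1)
            ≡ 1 + (b + b * b) * geomSum (b * b) j [ZMOD (l + 1)] := by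
              exact Int.ModEq.add_left 1 ((Int.ModEq.add_left b heq).mul
                ((pymod_modEq _ _).trans (geomSum_congr heq j)))
          _ = geomSum b (2 * j + 2) := (geomSum_even b j).symm
          _ = geomSum b n.toNat := by rw [hnt]

-- Σ_{i < c} b^i, the c-term geometric sum (gsum b (k+1) = geomSum b k)
def gsum (b : Int) : Nat → Int
  | 0 => 0
  | c + 1 => gsum b c + b ^ c

theorem gsum_add (b : Int) (x y : Nat) : gsum b (x + y) = gsum b x + b ^ x * gsum b y := by
  induction y with
  | zero => simp [gsum]
  | succ y ih =>
    have h : x + (y + 1) = (x + y) + 1 := by omega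
    rw [h]
    calc gsum b ((x + y) + 1) = gsum b (x + y) + b ^ (x + y) := rfl
      _ = gsum b x + b ^ x * gsum b y + b ^ (x + y) := by rw [ih]
      _ = gsum b x + b ^ x * (gsum b y + b ^ y) := by rw [pow_add]; ring
      _ = gsum b x + b ^ x * gsum b (y + 1) := rfl

theorem gsum_eq_geomSum (b : Int) (k : Nat) : gsum b (k + 1) = geomSum b k := by
  induction k with
  | zero => simp [gsum, geomSum]
  | succ k ih =>
    calc gsum b (k + 2) = gsum b (k + 1) + b ^ (k + 1) := rfl
      _ = geomSum b k + b ^ (k + 1) := by rw [ih]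
      _ = geomSum b (k + 1) := (geomSum_succ' b k).symm

theorem sumRecLoop_zero (f : Nat) (m res mult t p : Int) :
    sumRecLoop f m 0 res mult t p = res := by
  cases f <;> simp [sumRecLoop]

-- invariant of the bit loop: t ≡ block sum of X terms, p ≡ b^X; the loop adds mult · gsum b (c·X)
theorem sumRecLoop_char (b m : Int) (hm : m ≠ 0) :
    ∀ (fuel : Nat) (c : Nat), 0 < c → c < fuel → ∀ (X : Nat) (res mult t p : Int),
      t ≡ gsum b X [ZMOD m] → p ≡ b ^ X [ZMOD m] →
      sumRecLoop fuel m (c : Int) res mult t p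
        = PySem.Int.mod (res + mult * gsum b (c * X)) m := by
  intro fuel
  induction fuel with
  | zero => intro c hc hf; omega
  | succ fuel ih =>
    intro c hc hf X res mult t p ht hp
    have hcpos : (0 : Int) < (c : Int) := by exact_mod_cast hc
    have hmod2 : PySem.Int.mod (c : Int) 2 = ((c % 2 : Nat) : Int) := by
      rw [PySem.Int.mod_eq_emod_of_pos (by omega)]; omega
    have hdiv : PySem.Int.floordiv (c : Int) 2 = ((c / 2 : Nat) : Int) := by
      rw [PySem.Int.floordiv_eq_ediv_of_pos (by omega)]; omega
    have ht' : PySem.Int.mod (t * (1 + p)) m ≡ gsum b (X + X) [ZMOD m] := by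
      calc PySem.Int.mod (t * (1 + p)) m ≡ t * (1 + p) [ZMOD m] := pymod_modEq _ _
        _ ≡ gsum b X * (1 + b ^ X) [ZMOD m] := Int.ModEq.mul ht (Int.ModEq.add_left 1 hp)
        _ = gsum b (X + X) := by rw [gsum_add]; ring
    have hp' : PySem.Int.mod (p * p) m ≡ b ^ (X + X) [ZMOD m] := by
      calc PySem.Int.mod (p * p) m ≡ p * p [ZMOD m] := pymod_modEq _ _
        _ ≡ b ^ X * b ^ X [ZMOD m] := Int.ModEq.mul hp hp
        _ = b ^ (X + X) := (pow_add b X X).symm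
    by_cases hone : c = 1
    · subst hone
      simp only [sumRecLoop, hcpos, if_true, hmod2, hdiv]
      norm_num [sumRecLoop_zero]
      apply pymod_congr hm
      exact Int.ModEq.add_left res (Int.ModEq.mul_left mult ht)
    · have hc2 : 2 ≤ c := by omega
      set q := c / 2 with hqdef
      have hq1 : 1 ≤ q := by omega
      have hrec := ih q (by omega) (by omega) (X + X)
      by_cases hodd : c % 2 = 1
      · -- odd bit: take this block, advance res and mult
        have hcq : c = 2 * q + 1 := by omega
        simp only [sumRecLoop, hcpos, if_true, hmod2, hdiv, hodd]
        norm_num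
        rw [hrec (PySem.Int.mod (res + mult * t) m) (PySem.Int.mod (mult * p) m)
              (PySem.Int.mod (t * (1 + p)) m) (PySem.Int.mod (p * p) m) ht' hp']
        apply pymod_congr hm
        have hsplit : c * X = X + q * (X + X) := by rw [hcq]; ring
        calc PySem.Int.mod (res + mult * t) m + PySem.Int.mod (mult * p) m * gsum b (q * (X + X))
            ≡ (res + mult * gsum b X) + (mult * b ^ X) * gsum b (q * (X + X)) [ZMOD m] :=
              Int.ModEq.add
                ((pymod_modEq _ _).trans (Int.ModEq.add_left res (Int.ModEq.mul_left mult ht)))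
                (Int.ModEq.mul_right _ ((pymod_modEq _ _).trans (Int.ModEq.mul_left mult hp)))
          _ = res + mult * (gsum b X + b ^ X * gsum b (q * (X + X))) := by ring
          _ = res + mult * gsum b (c * X) := by rw [hsplit, gsum_add]
      · -- even bit: skip this block
        have hcq : c = 2 * q := by omega
        have hbit : ¬ ((c % 2 : Nat) : Int) = 1 := by omega
        simp only [sumRecLoop, hcpos, if_true, hmod2, hdiv, hbit, if_false]
        rw [hrec res mult (PySem.Int.mod (t * (1 + p)) m) (PySem.Int.mod (p * p) m) ht' hp']
        have hsplit : c * X = q * (X + X) := by rw [hcq]; ring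
        rw [hsplit]

theorem sumRec_alt_char (b n l : Int) (hn : 0 ≤ n) (hm : l + 1 ≠ 0) :
    sumRec_alt b n l = PySem.Int.mod (geomSum b n.toNat) (l + 1) := by
  unfold sumRec_alt
  have hcast : n + 1 = ((n.toNat + 1 : Nat) : Int) := by omega
  rw [hcast, Int.toNat_natCast,
    sumRecLoop_char b (l + 1) hm ((n.toNat + 1) + 1) (n.toNat + 1) (by omega) (by omega)
      1 0 1 1 b (by simp [gsum]) (by rw [pow_one]),
    mul_one, gsum_eq_geomSum]
  norm_num

-- ===== VERDICT (by name: the statement is the Claim_ definition above) =====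
theorem sumRec_spec : Claim_unchanged_sumRec := by
  intro b n l _ hpre hnd
  obtain ⟨hn, hl⟩ := hpre
  have hm : l + 1 ≠ 0 := by omega
  by_cases h0 : n = 0
  · -- outside D_ with n = 0 we have 1 ≤ l, so 1 % (l+1) = 1
    have hl1 : 1 ≤ l := by
      by_contra hc
      exact hnd ⟨h0, by omega, hl⟩
    subst h0
    have hB : sumRec_alt b 0 l = PySem.Int.mod (geomSum b 0) (l + 1) :=
      sumRec_alt_char b 0 l le_rfl hm
    have : PySem.Int.mod (1 : Int) (l + 1) = 1 := by
      rw [PySem.Int.mod_eq_emod_of_pos (by omega)]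
      exact Int.emod_eq_of_lt (by omega) (by omega)
    rw [hB]
    show (1 : Int) = _
    rw [show geomSum b 0 = 1 from rfl, this]
  · have hn1 : 0 < n := by omega
    rw [sumRec_alt_char b n l hn hm]
    exact sumRecGo_char l hm (n.toNat + 1) n b hn1 (by omega)

theorem sumRec_changed : Claim_changed_sumRec := by unfold Claim_changed_sumRec; decide

theorem sumRec_tight : Claim_exact_sumRec := by
  intro b n l _ hpre hd
  obtain ⟨h0, hl, hl1⟩ := hd
  subst h0
  have hm : l + 1 ≠ 0 := by omega
  have hB : sumRec_alt b 0 l = PySem.Int.mod (geomSum b 0) (l + 1) :=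
    sumRec_alt_char b 0 l le_rfl hm
  have hA : sumRec b 0 l = 1 := rfl
  rw [hA, hB, show geomSum b 0 = 1 from rfl]
  intro hcontra
  rcases lt_trichotomy (l + 1) 0 with hneg | hz | hposs
  · have := (PySem.Int.mod_neg_bounds (a := (1 : Int)) hneg).2
    omega
  · omega
  · -- l + 1 > 0 with l ≤ 0 and l ≠ -1 forces l = 0, modulus 1
    have : l = 0 := by omega
    subst this
    exact absurd hcontra (by decide)
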